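-- pv_equiv track=rewrite | github.com/masahiro-999/atcoder-workspace | agc016/A/main.py | count
-- ===== SOURCE A (Python) =====
-- def count(a,target):
--     def rewrite():
--         c = 0
--         for i in range(1,len(a)):
--             if a[i] == target:
--                 a[i-1] = target
--             if a[i-1] == target:
--                 c += 1
--
--         a.pop(-1)
--         return c == len(a)
--
--     ret = 0
--     while True:
--         ret += 1
--         if rewrite():
--             break
--     return ret
-- ===== SOURCE B (Python) =====
-- def count(a, target):
--     # Answer = length of the longest run of consecutive non-target elements
--     # (a prefix with no target counts as a run), but at least 1.
--     best = 0
--     last = -1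
--     for i, x in enumerate(a):
--         if x == target:
--             last = i
--         if i - last > best:
--             best = i - last
--     return max(best, 1)
-- ===== Notes on version B (the rewrite author's own statement) =====
-- stated objective: faster
-- what changed: Replaced the repeated rewrite-and-pop passes over the list (one pass per answer unit) by a single scan that computes the longest run of consecutive non-target elements (max(best,1)), which equals the number of passes A performs.
import Mathlib
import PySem

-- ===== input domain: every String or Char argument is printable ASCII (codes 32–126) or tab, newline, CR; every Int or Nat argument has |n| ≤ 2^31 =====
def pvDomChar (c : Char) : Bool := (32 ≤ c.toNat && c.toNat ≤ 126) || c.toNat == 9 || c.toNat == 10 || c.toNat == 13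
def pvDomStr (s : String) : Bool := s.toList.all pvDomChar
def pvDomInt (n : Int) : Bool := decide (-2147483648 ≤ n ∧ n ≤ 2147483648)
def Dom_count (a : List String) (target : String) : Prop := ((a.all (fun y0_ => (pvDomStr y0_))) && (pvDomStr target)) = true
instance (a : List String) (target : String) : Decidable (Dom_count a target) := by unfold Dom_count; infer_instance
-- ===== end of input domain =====

-- B replaces A's repeated rewrite-and-pop passes by one scan for the longest run of
-- non-target elements (objective: faster). A mutates its argument `a` in place
-- (overwrites entries and pops elements); the equivalence proved here is about the
-- RETURN value only — B does not mutate.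

-- ===== PORT A =====
-- one iteration of the inner `for i in range(1, len(a))` body; i ∈ [1, len) so
-- `a[i]`/`a[i-1]` are always in range and `getD … ""` is exact there
def stepA (target : String) (st : List String × Nat) (i : Nat) : List String × Nat :=
  let a1 := if st.1.getD i "" = target then st.1.set (i - 1) target else st.1
  (a1, if a1.getD (i - 1) "" = target then st.2 + 1 else st.2)

-- the `for` loop of `rewrite()` (before the pop): returns the rewritten list and c
def rewriteA (a : List String) (target : String) : List String × Nat :=
  (List.range' 1 (a.length - 1)).foldl (stepA target) (a, 0)

-- length preservation, needed by countLoop's termination argument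
theorem foldl_stepA_length (target : String) (l : List Nat) (st : List String × Nat) :
    ((l.foldl (stepA target) st).1).length = st.1.length := by
  induction l generalizing st with
  | nil => rfl
  | cons i l ih =>
    simp only [List.foldl_cons]
    rw [ih]
    unfold stepA
    dsimp only
    split <;> simp

-- the `while True:` loop; on `a = []` Python's `a.pop(-1)` raises IndexError
-- (excluded by Pre_count), the guard value there only makes the recursion total
def countLoop (a : List String) (target : String) (ret : Int) : Int :=
  if h : a = [] then ret + 1
  else
    let r := rewriteA a target
    let a2 := r.1.dropLast
    if r.2 = a2.length then ret + 1
    else countLoop a2 target (ret + 1)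
termination_by a.length
decreasing_by
  have hl : ((List.range' 1 (a.length - 1)).foldl (stepA target) (a, 0)).1.length = a.length :=
    foldl_stepA_length target (List.range' 1 (a.length - 1)) (a, 0)
  have hne : a.length ≠ 0 := fun hx => h (List.length_eq_zero_iff.mp hx)
  simp only [rewriteA, List.length_dropLast]
  omega

def count (a : List String) (target : String) : Int := countLoop a target 0

-- ===== PORT B =====
-- loop body of Source B's single scan: state (best, last), element (i, x)
def stepB (target : String) (st : Int × Int) (p : Int × String) : Int × Int :=
  let last := if p.2 = target then p.1 else st.2
  (if p.1 - last > st.1 then p.1 - last else st.1, last)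

def count_alt (a : List String) (target : String) : Int :=
  let st := (PySem.List.enumerate a).foldl (stepB target) (0, -1)
  max st.1 1

-- ===== PRECONDITION & SPEC =====
-- Pre_ excludes the empty list, on which A raises IndexError (`a.pop(-1)` on [])
def Pre_count (a : List String) (target : String) : Prop := a ≠ []
instance (a : List String) (target : String) : Decidable (Pre_count a target) := by unfold Pre_count; infer_instance
def pvWitness_count : List String × String := (["x", "t"], "t")


def Spec_count (a : List String) (target : String) (out : Int) : Prop := out = count_alt a target
instance (a : List String) (target : String) (out : Int) : Decidable (Spec_count a target out) := by unfold Spec_count; infer_instance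

-- ===== CLAIM (what is proved, stated in full; the proofs are below) =====
def Claim_equal_count : Prop := ∀ (a : List String) (target : String), Dom_count a target → Pre_count a target → Spec_count a target (count a target)

-- ===== LEMMAS AND PROOFS =====

-- run lengths of consecutive non-target elements: entry j is the length of the
-- maximal non-target block ending at position j (c = run pending before the list)
def runsFrom (t : String) (c : Nat) : List String → List Nat
  | [] => []
  | y :: ys => (if y = t then 0 else c + 1) :: runsFrom t (if y = t then 0 else c + 1) ys

def max0 (l : List Nat) : Nat := l.foldl max 0

def bestNat (t : String) (a : List String) : Nat := max0 (runsFrom t 0 a)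

-- the list A's rewrite pass produces (after the pop): element j of zwL t x rest is
-- target iff a[j] or a[j+1] was, where a = x :: rest
def zwL (t : String) : String → List String → List String
  | _, [] => []
  | x, y :: ys => (if y = t then t else x) :: zwL t y ys

theorem foldl_max_eq (l : List Nat) (i : Nat) : l.foldl max i = max i (max0 l) := by
  induction l generalizing i with
  | nil => simp [max0]
  | cons x l ih =>
    simp only [max0, List.foldl_cons]
    rw [ih, ih (max 0 x)]
    omega

theorem max0_cons (x : Nat) (l : List Nat) : max0 (x :: l) = max x (max0 l) := by
  have h := foldl_max_eq l (max 0 x)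
  simp only [max0, List.foldl_cons]
  rw [h]
  simp only [max0]
  omega

theorem runsFrom_zwL (t : String) : ∀ (rest : List String) (x : String) (c : Nat), (x = t → c = 0) →
    runsFrom t c (zwL t x rest) = (runsFrom t (if x = t then 0 else c + 1) rest).map (· - 1) := by
  intro rest
  induction rest with
  | nil => intro x c _; simp [zwL, runsFrom]
  | cons y ys ih =>
    intro x c hx
    by_cases hy : y = t
    · subst hy
      have h2 := ih y 0 (fun _ => rfl)
      simp [zwL, runsFrom] at h2 ⊢
      exact h2
    · by_cases hxt : x = t
      · have hc : c = 0 := hx hxt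
        subst hc; subst hxt
        have h2 := ih y 0 (fun h => absurd h hy)
        simp [zwL, runsFrom, hy] at h2 ⊢
        exact h2
      · have h2 := ih y (c + 1) (fun h => absurd h hy)
        simp [zwL, runsFrom, hy, hxt] at h2 ⊢
        exact h2

theorem max0_map_sub (l : List Nat) : max0 (l.map (· - 1)) = max0 l - 1 := by
  induction l with
  | nil => simp [max0]
  | cons x l ih => simp only [List.map_cons, max0_cons, ih]; omega

theorem max0_runsFrom_eq_zero_iff (t : String) : ∀ (l : List String) (c : Nat),
    (max0 (runsFrom t c l) = 0 ↔ ∀ y ∈ l, y = t) := by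
  intro l
  induction l with
  | nil => intro c; simp [runsFrom, max0]
  | cons y ys ih =>
    intro c
    by_cases hy : y = t
    · simp [runsFrom, hy, max0_cons, ih]
    · simp [runsFrom, hy, max0_cons]

theorem zwL_length (t : String) : ∀ (rest : List String) (x : String), (zwL t x rest).length = rest.length := by
  intro rest
  induction rest with
  | nil => intro x; rfl
  | cons y ys ih => intro x; simp [zwL, ih]

-- characterisation of A's rewrite pass
theorem foldl_stepA_inner (t : String) : ∀ (rest : List String) (x : String) (pre : List String) (cnt : Nat),
    (List.range' (pre.length + 1) rest.length).foldl (stepA t) (pre ++ x :: rest, cnt)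
      = (pre ++ zwL t x rest ++ (x :: rest).drop rest.length, cnt + List.count t (zwL t x rest)) := by
  intro rest
  induction rest with
  | nil => intro x pre cnt; simp [zwL]
  | cons y ys ih =>
    intro x pre cnt
    rw [List.length_cons, List.range'_succ, List.foldl_cons]
    have hget1 : (pre ++ x :: y :: ys).getD (pre.length + 1) "" = y := by
      rw [List.getD_append_right _ _ _ _ (by omega)]
      simp
    have hset : ∀ v, (pre ++ x :: y :: ys).set (pre.length + 1 - 1) v = pre ++ v :: y :: ys := by
      intro v
      rw [Nat.add_sub_cancel, List.set_append_right _ _ (le_refl _)]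
      simp
    have hget0 : ∀ (e : String), (pre ++ e :: y :: ys).getD (pre.length + 1 - 1) "" = e := by
      intro e
      rw [Nat.add_sub_cancel, List.getD_append_right _ _ _ _ (le_refl _)]
      simp
    have hstep : stepA t (pre ++ x :: y :: ys, cnt) (pre.length + 1)
        = (pre ++ (if y = t then t else x) :: y :: ys,
           if (if y = t then t else x) = t then cnt + 1 else cnt) := by
      unfold stepA
      dsimp only
      rw [hget1]
      by_cases hy : y = t
      · rw [if_pos hy, hset, hget0]
        simp [hy]
      · rw [if_neg hy, hget0]
        simp [hy]
    rw [hstep]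
    have h2 := ih y (pre ++ [if y = t then t else x]) (if (if y = t then t else x) = t then cnt + 1 else cnt)
    simp only [List.length_append, List.length_cons, List.length_nil, List.append_assoc,
      List.cons_append, List.nil_append] at h2
    rw [h2]
    simp only [zwL, Prod.mk.injEq, List.drop_succ_cons, List.count_cons, List.append_assoc,
      List.cons_append, beq_iff_eq]
    refine ⟨trivial, ?_⟩
    split_ifs <;> omega

theorem rewriteA_eq (t : String) (x : String) (rest : List String) :
    rewriteA (x :: rest) t = (zwL t x rest ++ (x :: rest).drop rest.length, List.count t (zwL t x rest)) := by
  have h := foldl_stepA_inner t rest x [] 0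
  simpa [rewriteA] using h

theorem drop_len_cons : ∀ (rest : List String) (x : String), ∃ z, (x :: rest).drop rest.length = [z] := by
  intro rest
  induction rest with
  | nil => intro x; exact ⟨x, rfl⟩
  | cons y ys ih => intro x; rw [List.length_cons, List.drop_succ_cons]; exact ih y

theorem countLoop_eq (t : String) : ∀ (n : Nat) (a : List String) (ret : Int), a.length = n → a ≠ [] →
    countLoop a t ret = ret + ((max 1 (bestNat t a) : Nat) : Int) := by
  intro n
  induction n using Nat.strong_induction_on with
  | _ n ih =>
    intro a ret hlen hne
    obtain ⟨x, rest, rfl⟩ := List.exists_cons_of_ne_nil hne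
    obtain ⟨z, hz⟩ := drop_len_cons rest x
    rw [countLoop, dif_neg hne]
    simp only [rewriteA_eq, hz, List.dropLast_concat]
    have hbest : bestNat t (x :: rest) = max (if x = t then 0 else 0 + 1) (max0 (runsFrom t (if x = t then 0 else 0 + 1) rest)) := by
      simp only [bestNat, runsFrom, max0_cons]
    have hzw : max0 (runsFrom t 0 (zwL t x rest)) = max0 (runsFrom t (if x = t then 0 else 0 + 1) rest) - 1 := by
      rw [runsFrom_zwL t rest x 0 (fun _ => rfl), max0_map_sub]
    set c0 : Nat := if x = t then 0 else 0 + 1 with hc0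
    set M := max0 (runsFrom t c0 rest) with hM
    have hcond : (List.count t (zwL t x rest) = (zwL t x rest).length) ↔ M ≤ 1 := by
      rw [List.count_eq_length]
      constructor
      · intro h
        have h0 : max0 (runsFrom t 0 (zwL t x rest)) = 0 :=
          (max0_runsFrom_eq_zero_iff t _ 0).mpr (fun y hy => (h y hy).symm)
        omega
      · intro h
        have h0 : max0 (runsFrom t 0 (zwL t x rest)) = 0 := by omega
        intro b hb
        exact ((max0_runsFrom_eq_zero_iff t _ 0).mp h0 b hb).symm
    have hc0le : c0 ≤ 1 := by rw [hc0]; split <;> omega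
    by_cases hM1 : M ≤ 1
    · rw [if_pos (hcond.mpr hM1)]
      have hone : max 1 (bestNat t (x :: rest)) = 1 := by rw [hbest]; omega
      rw [hone]
      push_cast
      ring
    · rw [if_neg (fun h => hM1 (hcond.mp h))]
      have hrne : rest ≠ [] := by
        intro h
        subst h
        have : M = 0 := by rw [hM]; simp [runsFrom, max0]
        omega
      have hzne : zwL t x rest ≠ [] := by
        have hl := zwL_length t rest x
        intro h
        rw [h] at hl
        exact hrne (List.length_eq_zero_iff.mp hl.symm)
      have hlt : (zwL t x rest).length < n := by
        rw [zwL_length]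
        rw [List.length_cons] at hlen
        omega
      rw [ih _ hlt (zwL t x rest) (ret + 1) rfl hzne]
      have hb2 : bestNat t (zwL t x rest) = M - 1 := by rw [bestNat, hzw]
      rw [hb2, hbest]
      omega

def stepL (t : String) (p : Nat × Nat) (x : String) : Nat × Nat :=
  (max p.1 (if x = t then 0 else p.2 + 1), if x = t then 0 else p.2 + 1)

theorem foldl_stepL_fst (t : String) : ∀ (l : List String) (b c : Nat),
    (l.foldl (stepL t) (b, c)).1 = max b (max0 (runsFrom t c l)) := by
  intro l
  induction l with
  | nil => intro b c; simp [max0, runsFrom]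
  | cons y ys ih =>
    intro b c
    simp only [List.foldl_cons, stepL, runsFrom, max0_cons]
    rw [ih]
    omega

theorem foldl_stepB_eq (t : String) : ∀ (l : List String) (k b c : Nat),
    (PySem.List.enumerate l (k : Int)).foldl (stepB t) ((b : Int), (k : Int) - 1 - (c : Int))
      = (((l.foldl (stepL t) (b, c)).1 : Int), ((k + l.length : Nat) : Int) - 1 - ((l.foldl (stepL t) (b, c)).2 : Int)) := by
  intro l
  induction l with
  | nil => intro k b c; simp [PySem.List.enumerate]
  | cons y ys ih =>
    intro k b c
    simp only [PySem.List.enumerate, List.foldl_cons]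
    have hstep : stepB t ((b : Int), (k : Int) - 1 - (c : Int)) ((k : Int), y)
        = (((max b (if y = t then 0 else c + 1) : Nat) : Int),
           ((k + 1 : Nat) : Int) - 1 - ((if y = t then 0 else c + 1 : Nat) : Int)) := by
      unfold stepB
      dsimp only
      simp only [Prod.mk.injEq]
      constructor <;> split_ifs <;> push_cast <;> omega
    rw [hstep]
    have h2 := ih (k + 1) (max b (if y = t then 0 else c + 1)) (if y = t then 0 else c + 1)
    have harg : ((k : Int) + 1) = ((k + 1 : Nat) : Int) := by push_cast; ring
    rw [harg, h2]
    simp only [stepL, List.length_cons, Prod.mk.injEq]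
    constructor
    · trivial
    · push_cast
      ring

theorem count_alt_eq (a : List String) (t : String) :
    count_alt a t = ((max 1 (bestNat t a) : Nat) : Int) := by
  have h := foldl_stepB_eq t a 0 0 0
  norm_num at h
  simp only [count_alt]
  rw [h, foldl_stepL_fst]
  simp only [bestNat]
  push_cast
  omega

-- ===== VERDICT (by name: the statement is the Claim_ definition above) =====
theorem count_spec : Claim_equal_count := by
  intro a target _ hpre
  unfold Spec_count count
  rw [countLoop_eq target a.length a 0 rfl hpre, count_alt_eq]
  ring
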